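-- pv_equiv track=rewrite | github.com/pythoandtrojan/PolyTools | OSINT/placa.py | combinar_dados
-- ===== SOURCE A (Python) =====
-- def combinar_dados(resultados):
--     if not resultados or not isinstance(resultados, dict):
--         return None
--
--     campos_prioritarios = {
--         'placa': ['SinespCidadao', 'PlacaFipe'],
--         'marca': ['SinespCidadao', 'PlacaFipe'],
--         'modelo': ['SinespCidadao', 'PlacaFipe'],
--         'ano': ['SinespCidadao', 'PlacaFipe'],
--         'cor': ['SinespCidadao', 'PlacaFipe'],
--         'cidade': ['SinespCidadao', 'PlacaFipe'],
--         'uf': ['SinespCidadao', 'PlacaFipe'],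
--         'situacao': ['SinespCidadao'],
--         'valor_fipe': ['PlacaFipe']
--     }
--
--     final = {}
--     for campo, fontes in campos_prioritarios.items():
--         for fonte in fontes:
--             if fonte in resultados and campo in resultados[fonte] and resultados[fonte][campo]:
--                 final[campo] = resultados[fonte][campo]
--                 break
--
--     if final:
--         final['fontes'] = ', '.join(resultados.keys())
--     return final if final else None
-- ===== SOURCE B (Python) =====
-- SINESP_FIELDS = ('placa', 'marca', 'modelo', 'ano', 'cor', 'cidade', 'uf', 'situacao')
-- FIPE_FIELDS = ('placa', 'marca', 'modelo', 'ano', 'cor', 'cidade', 'uf', 'valor_fipe')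
-- FIELD_ORDER = ('placa', 'marca', 'modelo', 'ano', 'cor', 'cidade', 'uf', 'situacao', 'valor_fipe')
--
--
-- def combinar_dados(resultados):
--     if not resultados or not isinstance(resultados, dict):
--         return None
--
--     def camada(fonte, campos):
--         dados = resultados.get(fonte, {})
--         return {c: dados[c] for c in campos if c in dados and dados[c]}
--
--     merged = {**camada('PlacaFipe', FIPE_FIELDS), **camada('SinespCidadao', SINESP_FIELDS)}
--     final = {c: merged[c] for c in FIELD_ORDER if c in merged}
--     if not final:
--         return None
--     final['fontes'] = ', '.join(resultados)
--     return final
-- ===== Notes on version B (the rewrite author's own statement) =====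
-- stated objective: alternative
-- what changed: A iterates field-major (per field, scan its source-priority list with break, mutating one dict); B decomposes source-major: it builds one truthy-filtered dict per source, combines them with a dict-merge {**fipe, **sinesp} so Sinesp wins, and emits the result with a final comprehension in canonical field order.
import Mathlib
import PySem

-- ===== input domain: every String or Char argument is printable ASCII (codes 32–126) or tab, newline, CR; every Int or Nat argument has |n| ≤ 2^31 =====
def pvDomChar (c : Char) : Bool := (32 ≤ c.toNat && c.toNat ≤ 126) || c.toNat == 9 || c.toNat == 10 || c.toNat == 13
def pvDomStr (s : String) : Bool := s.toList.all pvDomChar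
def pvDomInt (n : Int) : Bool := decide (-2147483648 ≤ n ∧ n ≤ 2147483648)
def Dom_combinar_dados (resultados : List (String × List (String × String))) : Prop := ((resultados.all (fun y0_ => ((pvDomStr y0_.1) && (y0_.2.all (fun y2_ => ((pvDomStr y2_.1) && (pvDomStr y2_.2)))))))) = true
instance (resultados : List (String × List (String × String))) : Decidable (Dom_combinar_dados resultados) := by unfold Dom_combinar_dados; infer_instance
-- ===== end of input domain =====

-- B replaces A's field-major nested loops with break by a source-major decomposition: one filtered
-- dict per source, a priority merge ({**fipe, **sinesp}), and a final field-order comprehension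
-- (objective: alternative decomposition, same cost).

-- ===== PORT A =====
-- campos_prioritarios, in insertion order
def pvCampos : List (String × List String) :=
  [("placa", ["SinespCidadao", "PlacaFipe"]),
   ("marca", ["SinespCidadao", "PlacaFipe"]),
   ("modelo", ["SinespCidadao", "PlacaFipe"]),
   ("ano", ["SinespCidadao", "PlacaFipe"]),
   ("cor", ["SinespCidadao", "PlacaFipe"]),
   ("cidade", ["SinespCidadao", "PlacaFipe"]),
   ("uf", ["SinespCidadao", "PlacaFipe"]),
   ("situacao", ["SinespCidadao"]),
   ("valor_fipe", ["PlacaFipe"])]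

-- A's inner 'for fonte in fontes: if … : final[campo] = …; break' — the first truthy value, if any
def pvFirstTruthy (r : PySem.Dict String (List (String × String))) (campo : String) : List String → Option String
  | [] => none
  | fonte :: rest =>
    match r.get? fonte with
    | some dados =>
      match (PySem.Dict.ofList dados).get? campo with
      | some v => if v = "" then pvFirstTruthy r campo rest else some v
      | none => pvFirstTruthy r campo rest
    | none => pvFirstTruthy r campo rest

def combinar_dados (resultados : List (String × List (String × String))) : Option (List (String × String)) :=
  if resultados.isEmpty then none
  else
    let r := PySem.Dict.ofList resultados
    let final := pvCampos.foldl (fun final p =>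
      match pvFirstTruthy r p.1 p.2 with
      | some v => final.insert p.1 v
      | none => final) PySem.Dict.empty
    if final.items.isEmpty then none
    else some ((final.insert "fontes" (PySem.Str.join ", " r.keys)).items)

-- ===== PORT B =====
def pvSinespFields : List String := ["placa", "marca", "modelo", "ano", "cor", "cidade", "uf", "situacao"]
def pvFipeFields : List String := ["placa", "marca", "modelo", "ano", "cor", "cidade", "uf", "valor_fipe"]
def pvFieldOrder : List String := ["placa", "marca", "modelo", "ano", "cor", "cidade", "uf", "situacao", "valor_fipe"]

-- Source B's camada: the truthy entries of resultados.get(fonte, {}) restricted to campos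
def pvCamada (r : PySem.Dict String (List (String × String))) (fonte : String) (campos : List String) : PySem.Dict String String :=
  let dados := PySem.Dict.ofList (r.getD fonte [])
  campos.foldl (fun acc c =>
    match dados.get? c with
    | some v => if v = "" then acc else acc.insert c v
    | none => acc) PySem.Dict.empty

def combinar_dados_alt (resultados : List (String × List (String × String))) : Option (List (String × String)) :=
  if resultados.isEmpty then none
  else
    let r := PySem.Dict.ofList resultados
    -- merged = {**camada('PlacaFipe', …), **camada('SinespCidadao', …)}
    let merged := (pvCamada r "SinespCidadao" pvSinespFields).items.foldl
      (fun m kv => m.insert kv.1 kv.2) (pvCamada r "PlacaFipe" pvFipeFields)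
    let final := pvFieldOrder.foldl (fun f c =>
      match merged.get? c with
      | some v => f.insert c v
      | none => f) PySem.Dict.empty
    if final.items.isEmpty then none
    else some ((final.insert "fontes" (PySem.Str.join ", " r.keys)).items)


-- ===== PRECONDITION & SPEC =====
def Spec_combinar_dados (resultados : List (String × List (String × String))) (out : Option (List (String × String))) : Prop := out = combinar_dados_alt resultados
instance (resultados : List (String × List (String × String))) (out : Option (List (String × String))) : Decidable (Spec_combinar_dados resultados out) := by unfold Spec_combinar_dados; infer_instance

-- ===== CLAIM (what is proved, stated in full; the proofs are below) =====
def Claim_equal_combinar_dados : Prop := ∀ (resultados : List (String × List (String × String))), Dom_combinar_dados resultados → Spec_combinar_dados resultados (combinar_dados resultados)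

-- ===== LEMMAS AND PROOFS =====
theorem pv_items_foldl_condInsert {α : Type} (xs : List α) (key : α → String) (pick : α → Option String)
    (d : PySem.Dict String String)
    (hfresh : ∀ x ∈ xs, d.contains (key x) = false) (hnd : (xs.map key).Nodup) :
    (xs.foldl (fun f x => match pick x with | some v => f.insert (key x) v | none => f) d).items
      = d.items ++ xs.filterMap (fun x => (pick x).map (fun v => (key x, v))) := by
  induction xs generalizing d with
  | nil => simp
  | cons x t ih =>
    simp only [List.map_cons, List.nodup_cons, List.mem_map] at hnd
    simp only [List.foldl_cons, List.filterMap_cons]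
    cases hp : pick x with
    | none =>
      simp only [Option.map_none]
      rw [ih d (fun y hy => hfresh y (List.mem_cons_of_mem _ hy)) hnd.2]
    | some v =>
      simp only [Option.map_some]
      rw [ih (d.insert (key x) v) ?_ hnd.2]
      · rw [PySem.Dict.items_insert_of_not_contains _ _ (hfresh x List.mem_cons_self)]
        simp
      · intro y hy
        rw [PySem.Dict.contains_insert]
        have hne : key y ≠ key x := fun h => hnd.1 ⟨y, hy, h⟩
        simp [hne, hfresh y (List.mem_cons_of_mem _ hy)]

theorem pv_get?_foldl_condInsert (cs : List String) (pick : String → Option String)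
    (d : PySem.Dict String String) (c : String) :
    (cs.foldl (fun f c' => match pick c' with | some v => f.insert c' v | none => f) d).get? c
      = if c ∈ cs ∧ (pick c).isSome then pick c else d.get? c := by
  induction cs generalizing d with
  | nil => simp
  | cons x t ih =>
    simp only [List.foldl_cons]
    rw [ih]
    by_cases hct : c ∈ t ∧ (pick c).isSome
    · simp [hct, List.mem_cons]
    · simp only [if_neg hct]
      by_cases hcx : c = x
      · subst hcx
        cases hp : pick c with
        | none =>
          simp only
          rw [if_neg]
          rintro ⟨-, hs⟩; simp at hs
        | some v => simp [List.mem_cons, PySem.Dict.get?_insert_self]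
      · cases hp : pick x with
        | none =>
          simp only
          rw [if_neg]
          rintro ⟨hm, hs⟩; exact hct ⟨(List.mem_cons.mp hm).resolve_left hcx, hs⟩
        | some v =>
          simp only
          rw [PySem.Dict.get?_insert_of_ne _ _ hcx, if_neg]
          rintro ⟨hm, hs⟩; exact hct ⟨(List.mem_cons.mp hm).resolve_left hcx, hs⟩

theorem pv_get?_foldl_insert_pairs (xs : List (String × String)) (m0 : PySem.Dict String String)
    (c : String) (hnd : (xs.map Prod.fst).Nodup) :
    (xs.foldl (fun m kv => m.insert kv.1 kv.2) m0).get? c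
      = match (PySem.Dict.mk xs).get? c with | some v => some v | none => m0.get? c := by
  induction xs generalizing m0 with
  | nil =>
    simp only [List.foldl_nil]
    have h : (PySem.Dict.mk ([] : List (String × String))).get? c = none := rfl
    rw [h]
  | cons kv t ih =>
    obtain ⟨k, v⟩ := kv
    simp only [List.map_cons, List.nodup_cons, List.mem_map] at hnd
    simp only [List.foldl_cons]
    rw [ih _ hnd.2, PySem.Dict.get?_mk_cons]
    by_cases hkc : k = c
    · subst hkc
      have : (PySem.Dict.mk t).get? k = none := by
        rw [PySem.Dict.get?_eq_none_iff_not_mem_keys, PySem.Dict.keys_mk]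
        intro hm
        rcases List.mem_map.mp hm with ⟨p, hp, he⟩
        exact hnd.1 ⟨p, hp, he⟩
      simp [this, PySem.Dict.get?_insert_self]
    · have hne : c ≠ k := fun h => hkc h.symm
      rw [PySem.Dict.get?_insert_of_ne _ _ hne]
      simp [hkc]

def pvPick (r : PySem.Dict String (List (String × String))) (fonte c : String) : Option String :=
  match (PySem.Dict.ofList (r.getD fonte [])).get? c with
  | some v => if v = "" then none else some v
  | none => none

def pvMerged (r : PySem.Dict String (List (String × String))) : PySem.Dict String String :=
  (pvCamada r "SinespCidadao" pvSinespFields).items.foldl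
    (fun m kv => m.insert kv.1 kv.2) (pvCamada r "PlacaFipe" pvFipeFields)

theorem pv_firstTruthy_cons (r : PySem.Dict String (List (String × String))) (c fonte : String)
    (rest : List String) :
    pvFirstTruthy r c (fonte :: rest)
      = match pvPick r fonte c with
        | some v => some v
        | none => pvFirstTruthy r c rest := by
  rw [show pvFirstTruthy r c (fonte :: rest) = (match r.get? fonte with
    | some dados =>
      match (PySem.Dict.ofList dados).get? c with
      | some v => if v = "" then pvFirstTruthy r c rest else some v
      | none => pvFirstTruthy r c rest
    | none => pvFirstTruthy r c rest) from rfl]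
  unfold pvPick
  rw [PySem.Dict.getD_eq_get?_getD]
  cases h : r.get? fonte with
  | none =>
    have : (PySem.Dict.ofList ([] : List (String × String))).get? c = none := rfl
    simp [this]
  | some dados =>
    simp only [Option.getD_some]
    cases hv : (PySem.Dict.ofList dados).get? c with
    | none => simp
    | some v => by_cases he : v = "" <;> simp [he]

theorem pv_camada_get? (r : PySem.Dict String (List (String × String))) (fonte : String)
    (campos : List String) (c : String) :
    (pvCamada r fonte campos).get? c
      = if c ∈ campos ∧ (pvPick r fonte c).isSome then pvPick r fonte c else none := by
  unfold pvCamada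
  have hfun : (fun (acc : PySem.Dict String String) c' =>
      match (PySem.Dict.ofList (r.getD fonte [])).get? c' with
      | some v => if v = "" then acc else acc.insert c' v
      | none => acc)
    = (fun (acc : PySem.Dict String String) c' =>
      match pvPick r fonte c' with
      | some v => acc.insert c' v
      | none => acc) := by
    funext acc c'
    unfold pvPick
    cases h : (PySem.Dict.ofList (r.getD fonte [])).get? c' with
    | none => simp
    | some v => by_cases he : v = "" <;> simp [he]
  simp only [hfun]
  rw [pv_get?_foldl_condInsert]
  simp [PySem.Dict.get?_empty]

theorem pv_camada_items (r : PySem.Dict String (List (String × String))) (fonte : String)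
    (campos : List String) (hnd : campos.Nodup) :
    (pvCamada r fonte campos).items
      = campos.filterMap (fun c => (pvPick r fonte c).map (fun v => (c, v))) := by
  unfold pvCamada
  have hfun : (fun (acc : PySem.Dict String String) c' =>
      match (PySem.Dict.ofList (r.getD fonte [])).get? c' with
      | some v => if v = "" then acc else acc.insert c' v
      | none => acc)
    = (fun (acc : PySem.Dict String String) c' =>
      match pvPick r fonte c' with
      | some v => acc.insert c' v
      | none => acc) := by
    funext acc c'
    unfold pvPick
    cases h : (PySem.Dict.ofList (r.getD fonte [])).get? c' with
    | none => simp
    | some v => by_cases he : v = "" <;> simp [he]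
  simp only [hfun]
  have := pv_items_foldl_condInsert campos (fun c => c) (fun c => pvPick r fonte c)
    PySem.Dict.empty (by intro x _; exact PySem.Dict.contains_empty x) (by simpa using hnd)
  simp only [] at this
  rw [this]
  rfl

theorem pv_keys_filterMap_sublist {α : Type} (xs : List α) (key : α → String)
    (pick : α → Option String) :
    ((xs.filterMap (fun x => (pick x).map (fun v => (key x, v)))).map Prod.fst).Sublist
      (xs.map key) := by
  induction xs with
  | nil => simp
  | cons x t ih =>
    simp only [List.filterMap_cons, List.map_cons]
    cases pick x with
    | none => exact ih.cons _
    | some v => simpa using ih.cons₂ (key x)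

theorem pv_camada_nodup (r : PySem.Dict String (List (String × String))) (fonte : String)
    (campos : List String) (hnd : campos.Nodup) :
    ((pvCamada r fonte campos).items.map Prod.fst).Nodup := by
  rw [pv_camada_items r fonte campos hnd]
  exact ((pv_keys_filterMap_sublist campos (fun c => c) (fun c => pvPick r fonte c)).nodup
    (by simpa using hnd))

theorem pv_merged_get? (r : PySem.Dict String (List (String × String))) (c : String) :
    (pvMerged r).get? c
      = match (if c ∈ pvSinespFields ∧ (pvPick r "SinespCidadao" c).isSome
               then pvPick r "SinespCidadao" c else none) with
        | some v => some v
        | none => if c ∈ pvFipeFields ∧ (pvPick r "PlacaFipe" c).isSome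
                  then pvPick r "PlacaFipe" c else none := by
  unfold pvMerged
  rw [pv_get?_foldl_insert_pairs _ _ _ (pv_camada_nodup r _ _ (by decide))]
  rw [show PySem.Dict.mk (pvCamada r "SinespCidadao" pvSinespFields).items
        = pvCamada r "SinespCidadao" pvSinespFields from rfl]
  rw [pv_camada_get?, pv_camada_get?]

theorem pv_merged_get?_both (r : PySem.Dict String (List (String × String))) (c : String)
    (hs : c ∈ pvSinespFields) (hf : c ∈ pvFipeFields) :
    (pvMerged r).get? c = pvFirstTruthy r c ["SinespCidadao", "PlacaFipe"] := by
  rw [pv_merged_get?, pv_firstTruthy_cons, pv_firstTruthy_cons]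
  cases hA : pvPick r "SinespCidadao" c with
  | some v => simp [hs]
  | none =>
    cases hB : pvPick r "PlacaFipe" c with
    | some w => simp [hs, hf]
    | none => simp [pvFirstTruthy]

theorem pv_merged_get?_sinesp (r : PySem.Dict String (List (String × String))) (c : String)
    (hs : c ∈ pvSinespFields) (hf : c ∉ pvFipeFields) :
    (pvMerged r).get? c = pvFirstTruthy r c ["SinespCidadao"] := by
  rw [pv_merged_get?, pv_firstTruthy_cons]
  cases hA : pvPick r "SinespCidadao" c with
  | some v => simp [hs]
  | none => simp [hf, pvFirstTruthy]

theorem pv_merged_get?_fipe (r : PySem.Dict String (List (String × String))) (c : String)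
    (hs : c ∉ pvSinespFields) (hf : c ∈ pvFipeFields) :
    (pvMerged r).get? c = pvFirstTruthy r c ["PlacaFipe"] := by
  rw [pv_merged_get?, pv_firstTruthy_cons]
  cases hB : pvPick r "PlacaFipe" c with
  | some v => simp [hs, hf]
  | none => simp [hs, hf, pvFirstTruthy]

theorem pv_final_items (r : PySem.Dict String (List (String × String))) :
    (pvCampos.foldl (fun final p =>
        match pvFirstTruthy r p.1 p.2 with
        | some v => final.insert p.1 v
        | none => final) PySem.Dict.empty).items
      = (pvFieldOrder.foldl (fun f c =>
        match (pvMerged r).get? c with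
        | some v => f.insert c v
        | none => f) PySem.Dict.empty).items := by
  have hA := pv_items_foldl_condInsert pvCampos Prod.fst (fun p => pvFirstTruthy r p.1 p.2)
    PySem.Dict.empty (fun x _ => PySem.Dict.contains_empty x.1) (by decide)
  have hB := pv_items_foldl_condInsert pvFieldOrder (fun c => c) (fun c => (pvMerged r).get? c)
    PySem.Dict.empty (fun x _ => PySem.Dict.contains_empty x) (by decide)
  simp only [] at hA hB
  rw [hA, hB]
  have h1 := pv_merged_get?_both r "placa" (by decide) (by decide)
  have h2 := pv_merged_get?_both r "marca" (by decide) (by decide)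
  have h3 := pv_merged_get?_both r "modelo" (by decide) (by decide)
  have h4 := pv_merged_get?_both r "ano" (by decide) (by decide)
  have h5 := pv_merged_get?_both r "cor" (by decide) (by decide)
  have h6 := pv_merged_get?_both r "cidade" (by decide) (by decide)
  have h7 := pv_merged_get?_both r "uf" (by decide) (by decide)
  have h8 := pv_merged_get?_sinesp r "situacao" (by decide) (by decide)
  have h9 := pv_merged_get?_fipe r "valor_fipe" (by decide) (by decide)
  simp only [pvCampos, pvFieldOrder, List.filterMap_cons, List.filterMap_nil,
    h1, h2, h3, h4, h5, h6, h7, h8, h9]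

theorem combinar_dados_eq (resultados : List (String × List (String × String))) :
    combinar_dados resultados = combinar_dados_alt resultados := by
  unfold combinar_dados combinar_dados_alt
  cases he : resultados.isEmpty with
  | true => simp
  | false =>
    simp only [Bool.false_eq_true, if_false]
    have hfin : (pvCampos.foldl (fun final p =>
        match pvFirstTruthy (PySem.Dict.ofList resultados) p.1 p.2 with
        | some v => final.insert p.1 v
        | none => final) PySem.Dict.empty)
      = (pvFieldOrder.foldl (fun f c =>
        match (pvMerged (PySem.Dict.ofList resultados)).get? c with
        | some v => f.insert c v
        | none => f) PySem.Dict.empty) :=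
      PySem.Dict.ext (pv_final_items (PySem.Dict.ofList resultados))
    rw [show pvMerged (PySem.Dict.ofList resultados)
        = (pvCamada (PySem.Dict.ofList resultados) "SinespCidadao" pvSinespFields).items.foldl
          (fun m kv => m.insert kv.1 kv.2)
          (pvCamada (PySem.Dict.ofList resultados) "PlacaFipe" pvFipeFields) from rfl] at hfin
    rw [← hfin]

-- ===== VERDICT (by name: the statement is the Claim_ definition above) =====
theorem combinar_dados_spec : Claim_equal_combinar_dados := by
  intro resultados _
  unfold Spec_combinar_dados
  exact combinar_dados_eq resultados
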